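-- pv_equiv track=rewrite | github.com/nuniniyujin/Link-Prediction-Citation-Network | manual_features.py | common_authors_publication
-- ===== SOURCE A (Python) =====
-- def common_authors_publication(node_0, node_1, authors_dict, dict_coauthors):
--     '''
--     give back the number document the common authors released
--     '''
--     list_authors_0 = authors_dict[int(node_0)]
--     list_authors_1 = authors_dict[int(node_1)]
--     common = list(set(list_authors_0).intersection(list_authors_1))
--     nb_copubli = 0
--     for author0 in list_authors_0 :
--         for author1 in list_authors_1 :
--             if author0!= author1:
--                   if author1 in dict_coauthors[author0]:
--                       nb_copubli += dict_coauthors[author0][author1]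
--
--     return len(common), nb_copubli
-- ===== SOURCE B (Python) =====
-- def common_authors_publication(node_0, node_1, authors_dict, dict_coauthors):
--     '''
--     give back the number document the common authors released
--     '''
--     list_authors_0 = authors_dict[int(node_0)]
--     list_authors_1 = authors_dict[int(node_1)]
--     cnt0 = {}
--     for a in list_authors_0:
--         cnt0[a] = cnt0.get(a, 0) + 1
--     cnt1 = {}
--     for a in list_authors_1:
--         cnt1[a] = cnt1.get(a, 0) + 1
--     n_common = 0
--     for a in cnt0:
--         if a in cnt1:
--             n_common += 1
--     nb_copubli = 0
--     for author0, c0 in cnt0.items():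
--         for author1, w in dict_coauthors.get(author0, {}).items():
--             if author1 != author0:
--                 c1 = cnt1.get(author1)
--                 if c1 is not None:
--                     nb_copubli += c0 * w * c1
--     return n_common, nb_copubli
-- ===== Notes on version B (the rewrite author's own statement) =====
-- stated objective: alternative
-- what changed: Instead of A's nested scan of the two author lists with a dict lookup per pair, B builds Counters of both lists and drives the weight sum off the adjacency dict itself: for each distinct author0 it iterates dict_coauthors.get(author0, {}).items() and adds c0*w*c1, so the inner traversal is over stored coauthor edges, not over list_authors_1.
import Mathlib
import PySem

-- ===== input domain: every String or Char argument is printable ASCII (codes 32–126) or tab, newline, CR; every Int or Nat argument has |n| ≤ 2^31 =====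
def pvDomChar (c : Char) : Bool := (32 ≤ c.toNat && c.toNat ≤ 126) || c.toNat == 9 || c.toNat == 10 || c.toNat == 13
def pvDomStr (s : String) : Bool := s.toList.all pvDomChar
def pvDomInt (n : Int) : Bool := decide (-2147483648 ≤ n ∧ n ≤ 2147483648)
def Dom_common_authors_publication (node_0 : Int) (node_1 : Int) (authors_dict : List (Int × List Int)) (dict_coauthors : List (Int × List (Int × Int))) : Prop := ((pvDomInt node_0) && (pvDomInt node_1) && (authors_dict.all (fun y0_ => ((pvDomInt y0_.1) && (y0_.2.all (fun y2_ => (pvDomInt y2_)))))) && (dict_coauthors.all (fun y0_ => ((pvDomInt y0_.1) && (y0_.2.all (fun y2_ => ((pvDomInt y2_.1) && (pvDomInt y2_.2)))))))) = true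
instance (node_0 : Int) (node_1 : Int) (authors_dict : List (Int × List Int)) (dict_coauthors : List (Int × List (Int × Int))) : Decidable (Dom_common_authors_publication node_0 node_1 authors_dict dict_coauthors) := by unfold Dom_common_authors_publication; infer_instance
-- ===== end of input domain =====

-- B builds Counters of both author lists and drives the weight sum off the adjacency dict's own
-- items (one pass per stored coauthor edge of each distinct author0, weighted by both counts),
-- instead of A's nested scan of the two lists with a lookup per pair; objective: alternative.

-- ===== PORT A =====
def common_authors_publication (node_0 : Int) (node_1 : Int) (authors_dict : List (Int × List Int)) (dict_coauthors : List (Int × List (Int × Int))) : Int × Int :=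
  -- authors_dict[int(node_0)] / [int(node_1)]: dict lookups (KeyError excluded by Pre_; default [] is never reached there)
  let la0 : List Int := PySem.Dict.getD ⟨authors_dict⟩ node_0 []
  let la1 : List Int := PySem.Dict.getD ⟨authors_dict⟩ node_1 []
  -- common = list(set(list_authors_0).intersection(list_authors_1))
  let common : PySem.Set Int := PySem.Set.inter (PySem.Set.ofList la0) la1
  -- nested for-loops accumulating nb_copubli; dict_coauthors[author0] (KeyError excluded by Pre_)
  let nb : Int := la0.foldl (fun acc a0 =>
    la1.foldl (fun acc a1 =>
      if a0 ≠ a1 then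
        match PySem.Dict.get? (⟨PySem.Dict.getD ⟨dict_coauthors⟩ a0 []⟩ : PySem.Dict Int Int) a1 with
        | some w => acc + w
        | none => acc
      else acc) acc) 0
  ((common.length : Int), nb)

-- ===== PORT B =====
def common_authors_publication_alt (node_0 : Int) (node_1 : Int) (authors_dict : List (Int × List Int)) (dict_coauthors : List (Int × List (Int × Int))) : Int × Int :=
  let la0 : List Int := PySem.Dict.getD ⟨authors_dict⟩ node_0 []
  let la1 : List Int := PySem.Dict.getD ⟨authors_dict⟩ node_1 []
  -- cnt0 / cnt1: plain-dict counting loops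
  let cnt0 : PySem.Dict Int Int := la0.foldl (fun d a => d.insert a (d.getD a 0 + 1)) PySem.Dict.empty
  let cnt1 : PySem.Dict Int Int := la1.foldl (fun d a => d.insert a (d.getD a 0 + 1)) PySem.Dict.empty
  -- n_common: count cnt0's keys that are in cnt1
  let nCommon : Int := cnt0.keys.foldl (fun acc a => if cnt1.contains a then acc + 1 else acc) 0
  -- for (author0, c0) in cnt0.items(): for (author1, w) in dict_coauthors.get(author0, {}).items(): …
  let nb : Int := cnt0.items.foldl (fun acc p =>
    (PySem.Dict.getD (⟨dict_coauthors⟩ : PySem.Dict Int (List (Int × Int))) p.1 []).foldl (fun acc q =>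
      if q.1 ≠ p.1 then
        match PySem.Dict.get? cnt1 q.1 with
        | some c1 => acc + p.2 * q.2 * c1
        | none => acc
      else acc) acc) 0
  (nCommon, nb)

-- ===== PRECONDITION & SPEC =====
-- Pre_ excludes (a) exactly the KeyError inputs of A: a node missing from authors_dict, or an author of
-- list_authors_0 missing from dict_coauthors while some different author occurs in list_authors_1; and
-- (b) inner association lists of dict_coauthors with duplicate keys, which represent no Python dict
-- (a real dict's .items() has unique keys; A reads the first match, B iterates every entry).
def Pre_common_authors_publication (node_0 : Int) (node_1 : Int) (authors_dict : List (Int × List Int)) (dict_coauthors : List (Int × List (Int × Int))) : Prop :=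
  (PySem.Dict.get? (⟨authors_dict⟩ : PySem.Dict Int (List Int)) node_0).isSome = true ∧
  (PySem.Dict.get? (⟨authors_dict⟩ : PySem.Dict Int (List Int)) node_1).isSome = true ∧
  (∀ a0 ∈ PySem.Dict.getD (⟨authors_dict⟩ : PySem.Dict Int (List Int)) node_0 [],
    (∃ a1 ∈ PySem.Dict.getD (⟨authors_dict⟩ : PySem.Dict Int (List Int)) node_1 [], a1 ≠ a0) →
    PySem.Dict.contains (⟨dict_coauthors⟩ : PySem.Dict Int (List (Int × Int))) a0 = true) ∧
  (∀ p ∈ dict_coauthors, (p.2.map Prod.fst).Nodup)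
instance (node_0 : Int) (node_1 : Int) (authors_dict : List (Int × List Int)) (dict_coauthors : List (Int × List (Int × Int))) : Decidable (Pre_common_authors_publication node_0 node_1 authors_dict dict_coauthors) := by unfold Pre_common_authors_publication; infer_instance

def pvWitness_common_authors_publication : Int × Int × (List (Int × List Int)) × (List (Int × List (Int × Int))) :=
  (1, 2, [(1, [10, 11]), (2, [11, 12])], [(10, [(11, 3), (12, 1)]), (11, [(12, 2)]), (12, [])])


def Spec_common_authors_publication (node_0 : Int) (node_1 : Int) (authors_dict : List (Int × List Int)) (dict_coauthors : List (Int × List (Int × Int))) (out : Int × Int) : Prop := out = common_authors_publication_alt node_0 node_1 authors_dict dict_coauthors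
instance (node_0 : Int) (node_1 : Int) (authors_dict : List (Int × List Int)) (dict_coauthors : List (Int × List (Int × Int))) (out : Int × Int) : Decidable (Spec_common_authors_publication node_0 node_1 authors_dict dict_coauthors out) := by unfold Spec_common_authors_publication; infer_instance

-- ===== CLAIM (what is proved, stated in full; the proofs are below) =====
def Claim_equal_common_authors_publication : Prop := ∀ (node_0 : Int) (node_1 : Int) (authors_dict : List (Int × List Int)) (dict_coauthors : List (Int × List (Int × Int))), Dom_common_authors_publication node_0 node_1 authors_dict dict_coauthors → Pre_common_authors_publication node_0 node_1 authors_dict dict_coauthors → Spec_common_authors_publication node_0 node_1 authors_dict dict_coauthors (common_authors_publication node_0 node_1 authors_dict dict_coauthors)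


-- ===== LEMMAS AND PROOFS =====

-- counting loop = length of the filtered list
theorem pv_count_fold (l : List Int) (pred : Int → Bool) (acc : Int) :
    l.foldl (fun acc a => if pred a then acc + 1 else acc) acc = acc + ((l.filter pred).length : Int) := by
  induction l generalizing acc with
  | nil => simp
  | cons b t ih =>
    by_cases hb : pred b
    · simp [hb, ih]; ring
    · simp [hb, ih]

-- Σ over l of (C at b, 0 elsewhere) = count of b times C
theorem pv_sum_ite_count (l : List Int) (b C : Int) :
    (l.map (fun a => if a = b then C else 0)).sum = (l.count b : Int) * C := by
  induction l with
  | nil => simp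
  | cons x t ih =>
    by_cases hx : x = b
    · subst hx; simp [ih]; ring
    · have : (b == x) = false := by simp [Ne.symm hx]
      simp [hx, ih]

-- On a nodup list containing a, a sum that is c at a and 0 elsewhere is c.
theorem pv_sum_ite_single (s : List Int) (a c : Int) (hnd : s.Nodup) (ha : a ∈ s) :
    (s.map (fun k => if k = a then c else 0)).sum = c := by
  induction s with
  | nil => cases ha
  | cons b t ih =>
    simp only [List.map_cons, List.sum_cons]
    rcases List.mem_cons.mp ha with rfl | h
    · have hz : (t.map (fun k => if k = a then c else (0:Int))).sum = 0 := by
        apply List.sum_eq_zero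
        intro x hx
        rcases List.mem_map.mp hx with ⟨k, hk, rfl⟩
        have hka : k ≠ a := fun e => (List.nodup_cons.mp hnd).1 (e ▸ hk)
        simp [hka]
      rw [if_pos rfl, hz, add_zero]
    · have hb : b ≠ a := fun e => (List.nodup_cons.mp hnd).1 (e ▸ h)
      rw [if_neg hb, ih (List.nodup_cons.mp hnd).2 h, zero_add]

-- Summing h over l occurrence by occurrence = summing h k · (count of k) over any nodup superset of l's elements.
theorem pv_sum_over_keys (l : List Int) (h : Int → Int) :
    ∀ (s : List Int), s.Nodup → (∀ x ∈ l, x ∈ s) →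
    (s.map (fun k => h k * (l.count k : Int))).sum = (l.map h).sum := by
  induction l with
  | nil => intro s _ _; simp
  | cons a t ih =>
    intro s hnd hsub
    have hstep : ∀ k : Int, h k * ((a :: t).count k : Int)
        = h k * (t.count k : Int) + (if k = a then h a else 0) := by
      intro k
      by_cases hk : k = a
      · subst hk; simp; ring
      · have : (a == k) = false := by simp [Ne.symm hk]
        simp [List.count_cons, this, hk]
    calc (s.map (fun k => h k * ((a :: t).count k : Int))).sum
        = (s.map (fun k => h k * (t.count k : Int) + (if k = a then h a else 0))).sum := by
          congr 1; exact List.map_congr_left (fun k _ => hstep k)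
      _ = (s.map (fun k => h k * (t.count k : Int))).sum
            + (s.map (fun k => if k = a then h a else 0)).sum := by
          rw [← List.sum_map_add]
      _ = (t.map h).sum + h a := by
          rw [ih s hnd (fun x hx => hsub x (List.mem_cons_of_mem a hx)),
              pv_sum_ite_single s a (h a) hnd (hsub a (List.mem_cons_self))]
      _ = ((a :: t).map h).sum := by simp [add_comm]

-- exchange of traversal: scanning la1 and looking each element up in the (nodup-keyed) assoc list d
-- sums the same as scanning d and weighting each entry by its count in la1
theorem pv_exchange (la1 : List Int) (k0 : Int) (d : List (Int × Int)) (hnd : (d.map Prod.fst).Nodup) :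
    (la1.map (fun a1 => if k0 ≠ a1 then ((PySem.Dict.get? (⟨d⟩ : PySem.Dict Int Int) a1).getD 0) else 0)).sum
    = (d.map (fun q => if q.1 ≠ k0 then q.2 * (la1.count q.1 : Int) else 0)).sum := by
  induction d with
  | nil =>
    simp [PySem.Dict.get?]
  | cons e t ih =>
    obtain ⟨b, w⟩ := e
    have hb : b ∉ t.map Prod.fst := (List.nodup_cons.mp hnd).1
    have ht : (t.map Prod.fst).Nodup := (List.nodup_cons.mp hnd).2
    have hgb : PySem.Dict.get? (⟨t⟩ : PySem.Dict Int Int) b = none := by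
      rw [PySem.Dict.get?_eq_none_iff_not_mem_keys]; simpa using hb
    have hterm : ∀ a1 : Int,
        (if k0 ≠ a1 then ((PySem.Dict.get? (⟨(b, w) :: t⟩ : PySem.Dict Int Int) a1).getD 0) else 0)
        = (if k0 ≠ a1 then ((PySem.Dict.get? (⟨t⟩ : PySem.Dict Int Int) a1).getD 0) else 0)
          + (if a1 = b then (if b ≠ k0 then w else 0) else 0) := by
      intro a1
      rw [PySem.Dict.get?_mk_cons]
      by_cases hab : a1 = b
      · rw [hab]
        by_cases hk : k0 = b
        · simp [hk]
        · simp [hk, Ne.symm hk, hgb]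
      · have hba : (b == a1) = false := by simp [Ne.symm hab]
        simp [hba, hab]
    calc (la1.map (fun a1 => if k0 ≠ a1 then ((PySem.Dict.get? (⟨(b, w) :: t⟩ : PySem.Dict Int Int) a1).getD 0) else 0)).sum
        = (la1.map (fun a1 => (if k0 ≠ a1 then ((PySem.Dict.get? (⟨t⟩ : PySem.Dict Int Int) a1).getD 0) else 0)
            + (if a1 = b then (if b ≠ k0 then w else 0) else 0))).sum := by
          congr 1; exact List.map_congr_left (fun a1 _ => hterm a1)
      _ = (la1.map (fun a1 => if k0 ≠ a1 then ((PySem.Dict.get? (⟨t⟩ : PySem.Dict Int Int) a1).getD 0) else 0)).sum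
            + (la1.map (fun a1 => if a1 = b then (if b ≠ k0 then w else 0) else 0)).sum := by
          rw [← List.sum_map_add]
      _ = (t.map (fun q => if q.1 ≠ k0 then q.2 * (la1.count q.1 : Int) else 0)).sum
            + (la1.count b : Int) * (if b ≠ k0 then w else 0) := by
          rw [ih ht, pv_sum_ite_count]
      _ = (((b, w) :: t).map (fun q => if q.1 ≠ k0 then q.2 * (la1.count q.1 : Int) else 0)).sum := by
          simp only [List.map_cons, List.sum_cons]
          by_cases hk : b ≠ k0
          · rw [if_pos hk, if_pos hk]; ring
          · rw [if_neg hk, if_neg hk]; ring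

-- fold-with-if-add over a list as acc + mapped sum (B/A loop bodies as sums)
theorem pv_foldA_sum (la1 : List Int) (lk : Int → Option Int) (a0 acc : Int) :
    la1.foldl (fun acc a1 =>
      if a0 ≠ a1 then
        match lk a1 with
        | some w => acc + w
        | none => acc
      else acc) acc
    = acc + (la1.map (fun a1 => if a0 ≠ a1 then (lk a1).getD 0 else 0)).sum := by
  rw [← PySem.List.foldl_add la1 (fun a1 => if a0 ≠ a1 then (lk a1).getD 0 else 0) acc]
  apply PySem.List.foldl_congr_mem
  intro b x _
  by_cases hx : a0 ≠ x
  · cases lk x <;> simp [hx]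
  · simp [hx]

theorem pv_foldB_sum (d : List (Int × Int)) (la1 : List Int) (k0 c0 acc : Int) :
    d.foldl (fun acc q =>
      if q.1 ≠ k0 then
        match PySem.Dict.get? (PySem.Dict.counter la1) q.1 with
        | some c1 => acc + c0 * q.2 * c1
        | none => acc
      else acc) acc
    = acc + c0 * (d.map (fun q => if q.1 ≠ k0 then q.2 * (la1.count q.1 : Int) else 0)).sum := by
  rw [← List.sum_map_mul_left,
      ← PySem.List.foldl_add d (fun q : Int × Int => c0 * (if q.1 ≠ k0 then q.2 * (la1.count q.1 : Int) else 0)) acc]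
  apply PySem.List.foldl_congr_mem
  intro b q _
  by_cases hq : q.1 ≠ k0
  · cases hlk : PySem.Dict.get? (PySem.Dict.counter la1) q.1 with
    | some c1 =>
      have hcnt : (la1.count q.1 : Int) = c1 := by
        rw [← PySem.Dict.getD_counter, PySem.Dict.getD_eq_get?_getD, hlk]; rfl
      simp only [if_pos hq, hlk, ← hcnt]
      ring
    | none =>
      have hc : (PySem.Dict.counter la1).contains q.1 = false := by
        rw [PySem.Dict.contains_eq_isSome_get?, hlk]; rfl
      have hnm : q.1 ∉ la1 := by
        intro hm
        rw [PySem.Dict.contains_counter] at hc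
        simp [hm] at hc
      simp [hq, List.count_eq_zero_of_not_mem hnm]
  · simp [hq]

-- ===== VERDICT (by name: the statement is the Claim_ definition above) =====
theorem common_authors_publication_spec : Claim_equal_common_authors_publication := by
  intro node_0 node_1 authors_dict dict_coauthors _ hpre
  obtain ⟨h0, h1, hcov, hnd⟩ := hpre
  unfold Spec_common_authors_publication
  unfold common_authors_publication common_authors_publication_alt
  simp only [PySem.Dict.foldl_insert_getD_add_one_eq_counter]
  set la0 : List Int := PySem.Dict.getD (⟨authors_dict⟩ : PySem.Dict Int (List Int)) node_0 [] with hla0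
  set la1 : List Int := PySem.Dict.getD (⟨authors_dict⟩ : PySem.Dict Int (List Int)) node_1 [] with hla1
  refine Prod.ext ?_ ?_
  · -- first component: len(intersection) = counting fold over counter keys
    show ((PySem.Set.inter (PySem.Set.ofList la0) la1).length : Int)
      = (PySem.Dict.counter la0).keys.foldl (fun acc a => if (PySem.Dict.counter la1).contains a then acc + 1 else acc) 0
    rw [PySem.Dict.keys_counter, pv_count_fold, zero_add]
    have hl : PySem.Set.inter (PySem.Set.ofList la0) la1
        = List.filter (fun a => (PySem.Dict.counter la1).contains a) (PySem.Set.ofList la0) := by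
      unfold PySem.Set.inter
      apply List.filter_congr
      intro x _
      rw [PySem.Dict.contains_counter]
      simp [PySem.Set.contains]
    rw [hl]
  · -- second component
    show la0.foldl _ 0 = (PySem.Dict.counter la0).items.foldl _ 0
    have hA : la0.foldl (fun acc a0 =>
        la1.foldl (fun acc a1 =>
          if a0 ≠ a1 then
            match PySem.Dict.get? (⟨PySem.Dict.getD (⟨dict_coauthors⟩ : PySem.Dict Int (List (Int × Int))) a0 []⟩ : PySem.Dict Int Int) a1 with
            | some w => acc + w
            | none => acc
          else acc) acc) 0
      = 0 + (la0.map (fun a0 => (la1.map (fun a1 => if a0 ≠ a1 then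
          ((PySem.Dict.get? (⟨PySem.Dict.getD (⟨dict_coauthors⟩ : PySem.Dict Int (List (Int × Int))) a0 []⟩ : PySem.Dict Int Int) a1).getD 0) else 0)).sum)).sum := by
      rw [← PySem.List.foldl_add la0 _ 0]
      apply PySem.List.foldl_congr_mem
      intro b a0 _
      exact pv_foldA_sum la1 _ a0 b
    have hB : (PySem.Dict.counter la0).items.foldl (fun acc p =>
        (PySem.Dict.getD (⟨dict_coauthors⟩ : PySem.Dict Int (List (Int × Int))) p.1 []).foldl (fun acc q =>
          if q.1 ≠ p.1 then
            match PySem.Dict.get? (PySem.Dict.counter la1) q.1 with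
            | some c1 => acc + p.2 * q.2 * c1
            | none => acc
          else acc) acc) 0
      = 0 + ((List.map (fun k => (k, (la0.count k : Int))) (PySem.Set.ofList la0)).map (fun p =>
          p.2 * (((PySem.Dict.getD (⟨dict_coauthors⟩ : PySem.Dict Int (List (Int × Int))) p.1 []).map
            (fun q => if q.1 ≠ p.1 then q.2 * (la1.count q.1 : Int) else 0)).sum))).sum := by
      rw [PySem.Dict.items_counter,
          ← PySem.List.foldl_add ((PySem.Set.ofList la0).map (fun k => (k, (la0.count k : Int)))) _ 0]
      apply PySem.List.foldl_congr_mem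
      intro b p _
      exact pv_foldB_sum _ la1 _ _ b
    rw [hA, hB, zero_add, zero_add, List.map_map]
    rw [← pv_sum_over_keys la0 _ (PySem.Set.ofList la0) (PySem.Set.nodup_ofList la0)
          (fun x hx => (PySem.Set.mem_ofList la0 x).mpr hx)]
    congr 1
    apply List.map_congr_left
    intro k0 hk0
    simp only [Function.comp]
    have hk0' : k0 ∈ la0 := (PySem.Set.mem_ofList la0 k0).mp hk0
    by_cases hc : PySem.Dict.contains (⟨dict_coauthors⟩ : PySem.Dict Int (List (Int × Int))) k0 = true
    · -- k0 has an adjacency list with nodup keys: exchange the traversal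
      have hndk : (((PySem.Dict.getD (⟨dict_coauthors⟩ : PySem.Dict Int (List (Int × Int))) k0 [])).map Prod.fst).Nodup := by
        have hs : (PySem.Dict.get? (⟨dict_coauthors⟩ : PySem.Dict Int (List (Int × Int))) k0).isSome = true := by
          rw [← PySem.Dict.contains_eq_isSome_get?]; exact hc
        rcases Option.isSome_iff_exists.mp hs with ⟨v, hv⟩
        rw [PySem.Dict.getD_of_get?_eq_some _ _ hv]
        have hmem : (k0, v) ∈ dict_coauthors := by
          have := PySem.Dict.mem_items_of_get?_eq_some _ hv
          simpa [PySem.Dict.items] using this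
        exact hnd _ hmem
      rw [pv_exchange la1 k0 _ hndk]; ring
    · -- k0 missing from dict_coauthors: Pre_ forces every element of la1 to equal k0, both sides are 0
      have hall : ∀ a1 ∈ la1, a1 = k0 := by
        intro a1 ha1
        by_contra hne
        exact (by simpa [hc] using hcov k0 hk0' ⟨a1, ha1, hne⟩)
      have hcf : PySem.Dict.contains (⟨dict_coauthors⟩ : PySem.Dict Int (List (Int × Int))) k0 = false := by
        revert hc
        cases PySem.Dict.contains (⟨dict_coauthors⟩ : PySem.Dict Int (List (Int × Int))) k0 <;> simp
      have hd0 : PySem.Dict.getD (⟨dict_coauthors⟩ : PySem.Dict Int (List (Int × Int))) k0 [] = [] :=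
        PySem.Dict.getD_of_not_contains _ _ hcf
      have hz : (la1.map (fun a1 => if k0 ≠ a1 then
          ((PySem.Dict.get? (⟨PySem.Dict.getD (⟨dict_coauthors⟩ : PySem.Dict Int (List (Int × Int))) k0 []⟩ : PySem.Dict Int Int) a1).getD 0) else 0)).sum = 0 := by
        apply List.sum_eq_zero
        intro x hx
        rcases List.mem_map.mp hx with ⟨a1, ha1, rfl⟩
        simp [hall a1 ha1]
      rw [hz, hd0]; simp
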